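-- pv_equiv track=rewrite | github.com/jaypal1046/neural_engine | server/modify_pipeline.py | apply_selection_to_text
-- ===== SOURCE A (Python) =====
-- from typing import Any, Optional
--
-- def apply_selection_to_text(full_text: str, selection: dict[str, Any], replacement: str) -> str:
--     lines = full_text.splitlines(keepends=True)
--     if not lines:
--         lines = [""]
--
--     start_line = max(1, int(selection.get("startLine") or 1))
--     start_col = max(1, int(selection.get("startColumn") or 1))
--     end_line = max(start_line, int(selection.get("endLine") or start_line))
--     end_col = max(1, int(selection.get("endColumn") or start_col))
--
--     # Convert 1-based line/column to absolute character offsets.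
--     start_offset = 0
--     for idx in range(start_line - 1):
--         start_offset += len(lines[idx])
--     start_offset += start_col - 1
--
--     end_offset = 0
--     for idx in range(end_line - 1):
--         end_offset += len(lines[idx])
--     end_offset += end_col - 1
--
--     source = "".join(lines)
--     return source[:start_offset] + replacement + source[end_offset:]
-- ===== SOURCE B (Python) =====
-- def apply_selection_to_text(full_text: str, selection: dict, replacement: str) -> str:
--     # Scan the raw text once, collecting the absolute offset at which each line
--     # starts; entry k is the offset of (1-based) line k+1, with a final sentinel
--     # so that one-past-the-last line maps to len(full_text).
--     n = len(full_text)
--     starts = [0]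
--     i = 0
--     while i < n:
--         c = full_text[i]
--         if c == '\r':
--             i += 2 if i + 1 < n and full_text[i + 1] == '\n' else 1
--             starts.append(i)
--         elif c == '\n':
--             i += 1
--             starts.append(i)
--         else:
--             i += 1
--     if full_text[-1:] not in ('\n', '\r'):
--         starts.append(n)
--
--     def field(key, default):
--         v = selection.get(key)
--         return int(v) if v else default
--
--     start_line = max(1, field("startLine", 1))
--     start_col = max(1, field("startColumn", 1))
--     end_line = max(start_line, field("endLine", start_line))
--     end_col = max(1, field("endColumn", start_col))
--
--     start_offset = starts[start_line - 1] + start_col - 1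
--     end_offset = starts[end_line - 1] + end_col - 1
--
--     return full_text[:start_offset] + replacement + full_text[end_offset:]
-- ===== Notes on version B (the rewrite author's own statement) =====
-- stated objective: alternative
-- what changed: B never calls splitlines or join: it scans the raw text once with an index cursor, recording the absolute start offset of every line (plus an end sentinel) in a table, reads both selection offsets from that table, and patches full_text directly by slicing, instead of A's split-into-lines, two partial-sum loops over line lengths, and re-join.
import Mathlib
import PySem

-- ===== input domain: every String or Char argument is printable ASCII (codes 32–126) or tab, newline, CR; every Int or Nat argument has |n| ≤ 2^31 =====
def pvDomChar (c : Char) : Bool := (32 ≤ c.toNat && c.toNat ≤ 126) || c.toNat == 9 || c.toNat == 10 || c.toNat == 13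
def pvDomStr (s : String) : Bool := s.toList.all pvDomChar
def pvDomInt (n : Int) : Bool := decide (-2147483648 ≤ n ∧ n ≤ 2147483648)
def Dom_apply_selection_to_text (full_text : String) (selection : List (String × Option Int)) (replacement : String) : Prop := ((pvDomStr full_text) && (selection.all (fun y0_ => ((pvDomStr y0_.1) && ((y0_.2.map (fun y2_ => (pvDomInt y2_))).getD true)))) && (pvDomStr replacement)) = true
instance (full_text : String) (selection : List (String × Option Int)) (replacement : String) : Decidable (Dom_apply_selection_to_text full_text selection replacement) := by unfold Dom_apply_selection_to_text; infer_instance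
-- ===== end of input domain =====

-- B never splits the text into lines: it scans the raw character list once with an index
-- cursor, recording each line-start offset (plus an end sentinel) in a table, reads both
-- selection offsets from the table and patches full_text by direct slicing (objective:
-- alternative decomposition, same cost).

-- A-side helper: str.splitlines(keepends=True), exact on the ASCII domain (the only line
-- breaks among the admitted characters are '\r\n', '\r', '\n'); acc is the current line reversed
def pvSplitKeep (acc : List Char) : List Char → List (List Char)
  | [] => if acc = [] then [] else [acc.reverse]
  | '\r' :: '\n' :: rest => (acc.reverse ++ ['\r', '\n']) :: pvSplitKeep [] rest
  | '\n' :: rest => (acc.reverse ++ ['\n']) :: pvSplitKeep [] rest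
  | '\r' :: rest => (acc.reverse ++ ['\r']) :: pvSplitKeep [] rest
  | c :: rest => pvSplitKeep (c :: acc) rest

-- shared helper: int(selection.get(key) or default) — missing key, None and 0 give the default
def pvField (selection : List (String × Option Int)) (key : String) (dflt : Int) : Int :=
  match (selection.find? (fun p => p.1 == key)).map Prod.snd with
  | some (some n) => if n = 0 then dflt else n
  | _ => dflt

-- ===== PORT A =====
def apply_selection_to_text (full_text : String) (selection : List (String × Option Int)) (replacement : String) : String :=
  let lines0 := pvSplitKeep [] full_text.toList
  let lines := if lines0 = [] then [[]] else lines0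
  let start_line := max 1 (pvField selection "startLine" 1)
  let start_col := max 1 (pvField selection "startColumn" 1)
  let end_line := max start_line (pvField selection "endLine" start_line)
  let end_col := max 1 (pvField selection "endColumn" start_col)
  -- lines[idx] raises IndexError when out of range; Pre_ excludes that, so the default is never read
  let start_offset := (PySem.List.pyRange 0 (start_line - 1) 1).foldl
      (fun acc idx => acc + ((PySem.List.pyGetD lines idx []).length : Int)) 0 + start_col - 1
  let end_offset := (PySem.List.pyRange 0 (end_line - 1) 1).foldl
      (fun acc idx => acc + ((PySem.List.pyGetD lines idx []).length : Int)) 0 + end_col - 1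
  let source := PySem.Chars.join [] lines
  String.ofList (PySem.List.slice source none (some start_offset) ++ replacement.toList
    ++ PySem.List.slice source (some end_offset) none)

-- ===== PORT B =====
-- B's while-loop over the raw text with cursor i: emit the offset just past every line
-- break ('\r\n' consumed as one break, as in the Python)
def pvLineStarts (i : Nat) : List Char → List Int
  | [] => []
  | '\r' :: '\n' :: rest => ((i + 2 : Nat) : Int) :: pvLineStarts (i + 2) rest
  | '\n' :: rest => ((i + 1 : Nat) : Int) :: pvLineStarts (i + 1) rest
  | '\r' :: rest => ((i + 1 : Nat) : Int) :: pvLineStarts (i + 1) rest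
  | _ :: rest => pvLineStarts (i + 1) rest

def apply_selection_to_text_alt (full_text : String) (selection : List (String × Option Int)) (replacement : String) : String :=
  let cs := full_text.toList
  let n := cs.length
  let starts0 := (0 : Int) :: pvLineStarts 0 cs
  -- full_text[-1:] not in ('\n', '\r')  →  append the end sentinel
  let starts := match cs.getLast? with
    | some '\n' => starts0
    | some '\r' => starts0
    | _ => starts0 ++ [(n : Int)]
  let start_line := max 1 (pvField selection "startLine" 1)
  let start_col := max 1 (pvField selection "startColumn" 1)
  let end_line := max start_line (pvField selection "endLine" start_line)
  let end_col := max 1 (pvField selection "endColumn" start_col)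
  -- starts[line-1] raises IndexError when out of range; Pre_ excludes that, so the default is never read
  let start_offset := PySem.List.pyGetD starts (start_line - 1) 0 + start_col - 1
  let end_offset := PySem.List.pyGetD starts (end_line - 1) 0 + end_col - 1
  String.ofList (PySem.List.slice cs none (some start_offset) ++ replacement.toList
    ++ PySem.List.slice cs (some end_offset) none)

-- ===== PRECONDITION & SPEC =====
-- Pre_ excludes exactly the inputs on which the Python A raises IndexError: a (clamped)
-- start or end line number pointing beyond one-past-the-last line of the text.
def Pre_apply_selection_to_text (full_text : String) (selection : List (String × Option Int)) (replacement : String) : Prop :=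
  let n : Int := max 1 ((PySem.Str.splitlines full_text).length : Int)
  let sl := max 1 (pvField selection "startLine" 1)
  let el := max sl (pvField selection "endLine" sl)
  sl ≤ n + 1 ∧ el ≤ n + 1
instance (full_text : String) (selection : List (String × Option Int)) (replacement : String) : Decidable (Pre_apply_selection_to_text full_text selection replacement) := by unfold Pre_apply_selection_to_text; infer_instance

def pvWitness_apply_selection_to_text : String × (List (String × Option Int)) × String :=
  ("ab\ncd", [("startLine", some 1), ("endLine", some 2), ("endColumn", some 2)], "X")

def Spec_apply_selection_to_text (full_text : String) (selection : List (String × Option Int)) (replacement : String) (out : String) : Prop := out = apply_selection_to_text_alt full_text selection replacement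
instance (full_text : String) (selection : List (String × Option Int)) (replacement : String) (out : String) : Decidable (Spec_apply_selection_to_text full_text selection replacement out) := by unfold Spec_apply_selection_to_text; infer_instance

-- ===== CLAIM (what is proved, stated in full; the proofs are below) =====
def Claim_equal_apply_selection_to_text : Prop := ∀ (full_text : String) (selection : List (String × Option Int)) (replacement : String), Dom_apply_selection_to_text full_text selection replacement → Pre_apply_selection_to_text full_text selection replacement → Spec_apply_selection_to_text full_text selection replacement (apply_selection_to_text full_text selection replacement)

-- ===== LEMMAS AND PROOFS =====

-- prefix sum of the lengths of the first k lines, as an Int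
def pvS (ls : List (List Char)) (k : Nat) : Int := (((ls.take k).map List.length).sum : Nat)

theorem pvS_zero (ls : List (List Char)) : pvS ls 0 = 0 := by simp [pvS]

theorem pvS_cons (hd : List Char) (tl : List (List Char)) (k : Nat) :
    pvS (hd :: tl) (k + 1) = (hd.length : Int) + pvS tl k := by
  simp [pvS]

theorem pvS_succ (ls : List (List Char)) (m : Nat) (hm : m < ls.length) :
    pvS ls (m + 1) = pvS ls m + (ls.getD m []).length := by
  rw [pvS, pvS]
  push_cast
  rw [List.map_map, List.map_map, List.map_take, List.map_take,
      List.sum_take_succ _ m (by simpa using hm)]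
  simp [List.getD, List.getElem?_eq_getElem hm]

-- A's loop over range(line - 1) computes the prefix sum
theorem pvA_fold (ls : List (List Char)) (n : Nat) (hn : n ≤ ls.length) :
    (PySem.List.pyRange 0 (n : Int) 1).foldl
      (fun acc idx => acc + ((PySem.List.pyGetD ls idx []).length : Int)) 0 = pvS ls n := by
  induction n with
  | zero => simp [pvS]
  | succ m ih =>
    have hm : m < ls.length := by omega
    rw [show ((m + 1 : Nat) : Int) = (m : Int) + 1 by push_cast; ring,
        PySem.List.pyRange_one_succ_right (by positivity), List.foldl_append,
        ih (by omega), pvS_succ ls m hm]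
    simp [PySem.List.pyGetD_natCast, List.getD]

-- the cumulative line-end offsets of a line list, starting from offset t
def pvCums (t : Int) : List (List Char) → List Int
  | [] => []
  | ln :: rest => (t + (ln.length : Int)) :: pvCums (t + (ln.length : Int)) rest

-- does B's Python append the end sentinel? (acc = current partial line of the split)
def pvNeedTail (acc cs : List Char) : Bool :=
  match cs.getLast? with
  | none => !acc.isEmpty
  | some c => !(c == '\n' || c == '\r')

-- the sentinel test only looks at the last character when the text is nonempty
theorem pvNeedTail_cons (acc acc' : List Char) (x y : Char) (tl : List Char) :
    pvNeedTail acc (x :: y :: tl) = pvNeedTail acc' (y :: tl) := by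
  cases hlast : (y :: tl).getLast? with
  | none => simp [List.getLast?_eq_none_iff] at hlast
  | some z => simp [pvNeedTail, List.getLast?_cons_cons, hlast]

-- B's scan (plus the sentinel) produces exactly the cumulative offsets of A's line list
theorem pvScan_cums (acc cs : List Char) : ∀ i : Nat,
    pvLineStarts i cs ++ (if pvNeedTail acc cs then [((i + cs.length : Nat) : Int)] else [])
    = pvCums ((i : Int) - acc.length) (pvSplitKeep acc cs) := by
  induction acc, cs using pvSplitKeep.induct with
  | case1 =>
    intro i
    simp [pvLineStarts, pvNeedTail, pvSplitKeep, pvCums]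
  | case2 acc hacc =>
    intro i
    have hT : pvNeedTail acc [] = true := by
      simp [pvNeedTail, List.isEmpty_iff, hacc]
    rw [show pvLineStarts i [] = [] from rfl, hT,
        show pvSplitKeep acc [] = [acc.reverse] from by simp [pvSplitKeep, hacc],
        pvCums, pvCums]
    simp
    try omega
  | case3 acc rest ih =>
    intro i
    have hrw := ih (i + 2)
    have h1 : pvNeedTail acc ('\r' :: '\n' :: rest) = pvNeedTail [] rest := by
      cases rest with
      | nil => simp [pvNeedTail]
      | cons d tl =>
        exact (pvNeedTail_cons acc [] '\r' '\n' (d :: tl)).trans (pvNeedTail_cons [] [] '\n' d tl)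
    have h2 : (i + ('\r' :: '\n' :: rest).length) = (i + 2 + rest.length) := by
      rw [List.length_cons, List.length_cons]; omega
    have hX : ((i : Int) - (acc.length : Int)) + (((acc.reverse ++ ['\r', '\n']).length : Nat) : Int)
        = ((i + 2 : Nat) : Int) - ((List.length ([] : List Char) : Nat) : Int) := by
      simp only [List.length_append, List.length_reverse, List.length_cons, List.length_nil]
      push_cast
      omega
    rw [show pvLineStarts i ('\r' :: '\n' :: rest)
          = ((i + 2 : Nat) : Int) :: pvLineStarts (i + 2) rest from rfl,
        show pvSplitKeep acc ('\r' :: '\n' :: rest)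
          = (acc.reverse ++ ['\r', '\n']) :: pvSplitKeep [] rest from rfl,
        pvCums, h1, h2, hX, List.cons_append, hrw]
    simp
  | case4 acc rest ih =>
    intro i
    have hrw := ih (i + 1)
    have h1 : pvNeedTail acc ('\n' :: rest) = pvNeedTail [] rest := by
      cases rest with
      | nil => simp [pvNeedTail]
      | cons d tl => exact pvNeedTail_cons acc [] '\n' d tl
    have h2 : (i + ('\n' :: rest).length) = (i + 1 + rest.length) := by
      rw [List.length_cons]; omega
    have hX : ((i : Int) - (acc.length : Int)) + (((acc.reverse ++ ['\n']).length : Nat) : Int)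
        = ((i + 1 : Nat) : Int) - ((List.length ([] : List Char) : Nat) : Int) := by
      simp only [List.length_append, List.length_reverse, List.length_cons, List.length_nil]
      push_cast
      omega
    rw [show pvLineStarts i ('\n' :: rest)
          = ((i + 1 : Nat) : Int) :: pvLineStarts (i + 1) rest from rfl,
        show pvSplitKeep acc ('\n' :: rest)
          = (acc.reverse ++ ['\n']) :: pvSplitKeep [] rest from rfl,
        pvCums, h1, h2, hX, List.cons_append, hrw]
    simp
  | case5 acc rest hpat ih =>
    intro i
    have hrw := ih (i + 1)
    have h1 : pvNeedTail acc ('\r' :: rest) = pvNeedTail [] rest := by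
      cases rest with
      | nil => simp [pvNeedTail]
      | cons d tl => exact pvNeedTail_cons acc [] '\r' d tl
    have h2 : (i + ('\r' :: rest).length) = (i + 1 + rest.length) := by
      rw [List.length_cons]; omega
    have hX : ((i : Int) - (acc.length : Int)) + (((acc.reverse ++ ['\r']).length : Nat) : Int)
        = ((i + 1 : Nat) : Int) - ((List.length ([] : List Char) : Nat) : Int) := by
      simp only [List.length_append, List.length_reverse, List.length_cons, List.length_nil]
      push_cast
      omega
    have hredL : pvLineStarts i ('\r' :: rest) = ((i + 1 : Nat) : Int) :: pvLineStarts (i + 1) rest := by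
      cases rest with
      | nil => rfl
      | cons d tl =>
        have hd : d ≠ '\n' := fun h => hpat tl (by rw [h])
        simp [pvLineStarts, hd]
    have hredS : pvSplitKeep acc ('\r' :: rest) = (acc.reverse ++ ['\r']) :: pvSplitKeep [] rest := by
      cases rest with
      | nil => rfl
      | cons d tl =>
        have hd : d ≠ '\n' := fun h => hpat tl (by rw [h])
        simp [pvSplitKeep, hd]
    rw [hredL, hredS, pvCums, h1, h2, hX, List.cons_append, hrw]
    simp
  | case6 acc c rest hp1 hp2 hp3 ih =>
    intro i
    have hc1 : c ≠ '\n' := fun h => hp2 h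
    have hc2 : c ≠ '\r' := fun h => hp3 h
    have hrw := ih (i + 1)
    have h1 : pvNeedTail acc (c :: rest) = pvNeedTail (c :: acc) rest := by
      cases rest with
      | nil => simp [pvNeedTail, List.isEmpty_iff, hc1, hc2]
      | cons d tl => exact pvNeedTail_cons acc (c :: acc) c d tl
    have h2 : (i + (c :: rest).length) = (i + 1 + rest.length) := by
      rw [List.length_cons]; omega
    have hX : ((i : Int) - (acc.length : Int))
        = ((i + 1 : Nat) : Int) - (((c :: acc).length : Nat) : Int) := by
      simp only [List.length_cons]
      push_cast
      omega
    have hredL : pvLineStarts i (c :: rest) = pvLineStarts (i + 1) rest := by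
      cases rest with
      | nil => simp [pvLineStarts, hc1, hc2]
      | cons d tl =>
        by_cases hdn : c = '\r'
        · exact absurd hdn hc2
        · simp [pvLineStarts, hc1, hc2]
    have hredS : pvSplitKeep acc (c :: rest) = pvSplitKeep (c :: acc) rest := by
      cases rest with
      | nil => simp [pvSplitKeep, hc1, hc2]
      | cons d tl => simp [pvSplitKeep, hc1, hc2]
    rw [hredL, hredS, h1, h2, hX, hrw]

-- the split recombines to the original text
theorem pvSplitKeep_flatten (acc cs : List Char) :
    (pvSplitKeep acc cs).flatten = acc.reverse ++ cs := by
  induction acc, cs using pvSplitKeep.induct with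
  | case1 => simp [pvSplitKeep]
  | case2 acc hacc => simp [pvSplitKeep, hacc]
  | case3 acc rest ih => simp [pvSplitKeep, ih]
  | case4 acc rest ih => simp [pvSplitKeep, ih]
  | case5 acc rest hpat ih =>
    have hred : pvSplitKeep acc ('\r' :: rest) = (acc.reverse ++ ['\r']) :: pvSplitKeep [] rest := by
      cases rest with
      | nil => rfl
      | cons d tl =>
        have hd : d ≠ '\n' := fun h => hpat tl (by rw [h])
        simp [pvSplitKeep, hd]
    simp [hred, ih]
  | case6 acc c rest hp1 hp2 hp3 ih =>
    have hred : pvSplitKeep acc (c :: rest) = pvSplitKeep (c :: acc) rest := by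
      cases rest with
      | nil => simp [pvSplitKeep, hp2, hp3]
      | cons d tl =>
        by_cases hdn : c = '\r' ∧ d = '\n'
        · exact absurd hdn.1 (fun h => hp3 h)
        · simp [pvSplitKeep, (fun h => hp2 h : c ≠ '\n'), (fun h => hp3 h : c ≠ '\r')]
    simp [hred, ih]

theorem pvJoin_flatten (ls : List (List Char)) : PySem.Chars.join [] ls = ls.flatten := by
  induction ls with
  | nil => rfl
  | cons hd tl ih =>
    cases tl with
    | nil => simp [PySem.Chars.join, List.intercalate]
    | cons d t =>
      show [].intercalate (hd :: d :: t) = hd ++ (d :: t).flatten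
      rw [show ([].intercalate (hd :: d :: t) : List Char) = hd ++ [].intercalate (d :: t) by
        simp [List.intercalate]]
      exact congrArg (hd ++ ·) ih

theorem pvCums_getD (ls : List (List Char)) (t : Int) (m : Nat) (hm : m < ls.length) :
    (pvCums t ls).getD m 0 = t + pvS ls (m + 1) := by
  induction ls generalizing t m with
  | nil => simp at hm
  | cons hd tl ih =>
    cases m with
    | zero => simp [pvCums, pvS_cons, pvS_zero]
    | succ k =>
      have := ih (t + (hd.length : Int)) k (by simpa using hm)
      simp only [pvCums, List.getD_cons_succ, this, pvS_cons]
      ring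

-- B's table lookup at any admitted 1-based line number l equals A's partial-sum loop
theorem pvLookup (ls : List (List Char)) (l : Int) (h1 : 1 ≤ l) (h2 : l ≤ (ls.length : Int) + 1) :
    PySem.List.pyGetD ((0 : Int) :: pvCums 0 ls) (l - 1) 0
    = (PySem.List.pyRange 0 (l - 1) 1).foldl
        (fun acc idx => acc + ((PySem.List.pyGetD ls idx []).length : Int)) 0 := by
  obtain ⟨k, hk⟩ : ∃ k : Nat, l - 1 = (k : Int) := ⟨(l - 1).toNat, by omega⟩
  rw [hk, pvA_fold ls k (by omega), PySem.List.pyGetD_natCast]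
  cases k with
  | zero => simp [pvS]
  | succ m =>
    rw [List.getD_cons_succ, pvCums_getD ls 0 m (by omega)]
    ring

theorem pvCharEq (c : Char) (n : Nat) (d : Char) (hd : d.toNat = n) : (c = d) ↔ (c.toNat = n) := by
  constructor
  · rintro rfl; exact hd
  · intro h
    apply Char.ext
    apply UInt32.toNat_inj.mp
    show c.toNat = d.toNat
    omega

-- on the ASCII domain, splitlines' break test is exactly "is '\n' or '\r'"
theorem pvIsB_dom (c : Char) (hc : pvDomChar c = true) :
    (decide (c.toNat = 10) || decide (c.toNat = 13) || decide (c.toNat = 11) || decide (c.toNat = 12) || decide (c.toNat = 28) || decide (c.toNat = 29) || decide (c.toNat = 30) || decide (c.toNat = 133) || decide (c.toNat = 8232) || decide (c.toNat = 8233)) = (decide (c = '\n') || decide (c = '\r')) := by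
  rw [Bool.eq_iff_iff]
  simp only [Bool.or_eq_true, decide_eq_true_eq, pvCharEq c 10 '\n' rfl, pvCharEq c 13 '\r' rfl]
  simp [pvDomChar] at hc
  omega

-- keepends=True and keepends=False splitlines produce the same number of lines (on the domain)
theorem pvLenGo (isB : Char → Bool)
    (hB : ∀ c, pvDomChar c → (isB c = (c = '\n' || c = '\r')))
    (cs cur : List Char) (acc : List (List Char)) (hdom : cs.all pvDomChar) :
    (PySem.Chars.splitlines.go isB cs cur acc).length = acc.length + (pvSplitKeep cur cs).length := by
  induction cs, cur, acc using PySem.Chars.splitlines.go.induct (isB := isB) with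
  | case1 => simp_all [pvSplitKeep, PySem.Chars.splitlines.go]
  | case2 => simp_all [pvSplitKeep, PySem.Chars.splitlines.go]
  | case3 rest cur acc ih =>
    simp_all [pvSplitKeep, PySem.Chars.splitlines.go]
    omega
  | case4 c rest cur acc hpat hsB ih =>
    obtain ⟨hc, hrest⟩ := by simpa using hdom
    have h' : c = '\n' ∨ c = '\r' := by
      have := hB c hc
      simp [hsB] at this
      tauto
    rcases h' with rfl | rfl
    · simp_all [pvSplitKeep, PySem.Chars.splitlines.go]
      omega
    · cases rest with
      | nil => simp_all [pvSplitKeep, PySem.Chars.splitlines.go]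
      | cons hd tl =>
        have hhd : hd ≠ '\n' := fun h => hpat tl rfl (by rw [h])
        simp_all [pvSplitKeep, PySem.Chars.splitlines.go]
        omega
  | case5 c rest cur acc hpat hsB ih =>
    obtain ⟨hc, hrest⟩ := by simpa using hdom
    have h' : ¬(c = '\n' ∨ c = '\r') := by
      have := hB c hc
      simp [hsB] at this
      tauto
    have h1 : c ≠ '\n' := fun h => h' (Or.inl h)
    have h2 : c ≠ '\r' := fun h => h' (Or.inr h)
    simp_all [pvSplitKeep, PySem.Chars.splitlines.go]

theorem pvSplitlines_len (s : List Char) (hdom : s.all pvDomChar) :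
    (PySem.Chars.splitlines s).length = (pvSplitKeep [] s).length := by
  have h : PySem.Chars.splitlines s
      = PySem.Chars.splitlines.go (fun c =>
          decide (c.toNat = 10) || decide (c.toNat = 13) || decide (c.toNat = 11) || decide (c.toNat = 12) || decide (c.toNat = 28) || decide (c.toNat = 29) || decide (c.toNat = 30) || decide (c.toNat = 133) || decide (c.toNat = 8232) || decide (c.toNat = 8233)) s [] [] := rfl
  rw [h, pvLenGo _ (fun c hc => pvIsB_dom c hc) s [] [] hdom]
  simp

theorem pvStrSplitlines_len (s : String) (hdom : s.toList.all pvDomChar) :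
    (PySem.Str.splitlines s).length = (pvSplitKeep [] s.toList).length := by
  rw [← pvSplitlines_len s.toList hdom, ← PySem.Str.splitlines_map_toList, List.length_map]

-- B's starts table IS 0 followed by the cumulative offsets of A's line list
theorem pvStarts_eq (cs : List Char) :
    (match cs.getLast? with
      | some '\n' => (0 : Int) :: pvLineStarts 0 cs
      | some '\r' => (0 : Int) :: pvLineStarts 0 cs
      | _ => ((0 : Int) :: pvLineStarts 0 cs) ++ [(cs.length : Int)])
    = (0 : Int) :: pvCums 0 (if pvSplitKeep [] cs = [] then [[]] else pvSplitKeep [] cs) := by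
  have hmain := pvScan_cums [] cs 0
  cases hcs : cs.getLast? with
  | none =>
    have : cs = [] := by cases cs <;> simp_all
    subst this
    rfl
  | some c =>
    have hne : cs ≠ [] := by rintro rfl; simp at hcs
    have hsne : pvSplitKeep [] cs ≠ [] := by
      intro h
      have h0 := pvSplitKeep_flatten [] cs
      rw [h] at h0
      simp at h0
      exact hne h0
    rw [if_neg hsne]
    have hTail : pvNeedTail [] cs = !(c == '\n' || c == '\r') := by
      simp [pvNeedTail, hcs]
    rw [hTail] at hmain
    simp only [Nat.zero_add, Nat.cast_zero, List.length_nil, Int.sub_zero] at hmain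
    split
    · -- last char is '\n'
      rename_i hm
      have hceq : c = '\n' := by simp_all
      subst hceq
      simp only [BEq.rfl, Bool.true_or, Bool.not_true,
        Bool.false_eq_true, if_false, List.append_nil] at hmain
      rw [hmain]
    · -- last char is '\r'
      rename_i hm
      have hceq : c = '\r' := by simp_all
      subst hceq
      simp only [BEq.rfl, Bool.or_true, Bool.not_true,
        Bool.false_eq_true, if_false, List.append_nil] at hmain
      rw [hmain]
    · -- any other last char: the sentinel is appended
      rename_i hm1 hm2
      have hc1 : c ≠ '\n' := by intro h; subst h; exact hm1 rfl
      have hc2 : c ≠ '\r' := by intro h; subst h; exact hm2 rfl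
      have hb : (c == '\n' || c == '\r') = false := by
        simp [hc1, hc2]
      rw [hb] at hmain
      simp only [Bool.not_false, if_true] at hmain
      rw [List.cons_append, hmain]

-- A's source "".join(lines) is the original text
theorem pvJoin_lines (cs : List Char) :
    PySem.Chars.join [] (if pvSplitKeep [] cs = [] then [[]] else pvSplitKeep [] cs) = cs := by
  by_cases h : pvSplitKeep [] cs = []
  · have h0 := pvSplitKeep_flatten [] cs
    rw [h] at h0
    simp at h0
    have hnil : cs = [] := by exact h0
    subst hnil
    rfl
  · rw [if_neg h, pvJoin_flatten, pvSplitKeep_flatten]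
    rfl

-- ===== VERDICT (by name: the statement is the Claim_ definition above) =====
theorem apply_selection_to_text_spec : Claim_equal_apply_selection_to_text := by
  intro full_text selection replacement hdom hpre
  obtain ⟨h1, h2⟩ := hpre
  have hft : full_text.toList.all pvDomChar = true := by
    unfold Dom_apply_selection_to_text pvDomStr at hdom
    simp at hdom
    simpa using hdom.1.1
  unfold Spec_apply_selection_to_text apply_selection_to_text apply_selection_to_text_alt
  simp only []
  have hlen : ((if pvSplitKeep [] full_text.toList = [] then [[]] else pvSplitKeep [] full_text.toList).length : Int)
      = max 1 ((PySem.Str.splitlines full_text).length : Int) := by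
    rw [pvStrSplitlines_len full_text hft]
    by_cases h : pvSplitKeep [] full_text.toList = []
    · simp [h]
    · have hne : (pvSplitKeep [] full_text.toList).length ≠ 0 := by simpa using h
      simp only [h, if_false]
      omega
  rw [pvStarts_eq full_text.toList, pvJoin_lines full_text.toList,
      pvLookup _ _ (le_max_left _ _) (by rw [hlen]; exact h1),
      pvLookup _ _ (le_trans (le_max_left _ _) (le_max_left _ _)) (by rw [hlen]; exact h2)]
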